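-- pv_equiv track=rewrite | github.com/xxdr4gon/meeting-whisperer | app/services/summarize.py | create_general_summary
-- ===== SOURCE A (Python) =====
-- from typing import List, Dict, Any
--
-- def create_general_summary(sentences: List[str]) -> str:
--     """Create a general summary when no specific categories are found."""
--     if not sentences:
--         return "No content available for summary."
--
--     # Look for the most informative sentences
--     informative_sentences = []
--
--     for sentence in sentences[:5]:  # Check first 5 sentences
--         sentence_lower = sentence.lower()
--         # Score sentences based on content richness
--         score = 0
--
--         # Longer sentences are often more informative
--         score += len(sentence.split()) * 2
--
--         # Look for key information indicators
--         if any(word in sentence_lower for word in ['important', 'key', 'main', 'primary', 'critical', 'essential']):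
--             score += 10
--         if any(word in sentence_lower for word in ['discussed', 'mentioned', 'talked', 'said', 'stated']):
--             score += 5
--         if any(word in sentence_lower for word in ['conclusion', 'result', 'outcome', 'decision']):
--             score += 8
--         if any(word in sentence_lower for word in ['number', 'amount', 'quantity', 'statistics']):
--             score += 3
--
--         informative_sentences.append((score, sentence))
--
--     # Sort by score and take the best ones
--     informative_sentences.sort(key=lambda x: x[0], reverse=True)
--
--     if informative_sentences:
--         # Use the best sentence
--         best_sentence = informative_sentences[0][1]
--         return f"• {best_sentence[:200]}..."
--     else:
--         # Fallback to first sentence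
--         return f"• {sentences[0][:200]}..."
-- ===== SOURCE B (Python) =====
-- _BONUSES = [
--     (10, ('important', 'key', 'main', 'primary', 'critical', 'essential')),
--     (5, ('discussed', 'mentioned', 'talked', 'said', 'stated')),
--     (8, ('conclusion', 'result', 'outcome', 'decision')),
--     (3, ('number', 'amount', 'quantity', 'statistics')),
-- ]
--
--
-- def _score(sentence):
--     low = sentence.lower()
--     return 2 * len(sentence.split()) + sum(
--         bonus for bonus, words in _BONUSES if any(w in low for w in words))
--
--
-- def create_general_summary(sentences):
--     if not sentences:
--         return "No content available for summary."
--     head, *tail = sentences[:5]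
--     best_score, best = _score(head), head
--     for sentence in tail:
--         sc = _score(sentence)
--         if sc > best_score:
--             best_score, best = sc, sentence
--     return f"• {best[:200]}..."
-- ===== Notes on version B (the rewrite author's own statement) =====
-- stated objective: simpler
-- what changed: Replaces A's build-a-scored-list plus stable descending sort plus head-index (and its unreachable fallback branch) with a table-driven score (sum over a bonus table instead of four sequential ifs) and a single accumulator loop over the first five sentences that replaces the best only on a strictly larger score, which matches the stable sort's first-of-equal-scores tie-break.
import Mathlib
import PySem

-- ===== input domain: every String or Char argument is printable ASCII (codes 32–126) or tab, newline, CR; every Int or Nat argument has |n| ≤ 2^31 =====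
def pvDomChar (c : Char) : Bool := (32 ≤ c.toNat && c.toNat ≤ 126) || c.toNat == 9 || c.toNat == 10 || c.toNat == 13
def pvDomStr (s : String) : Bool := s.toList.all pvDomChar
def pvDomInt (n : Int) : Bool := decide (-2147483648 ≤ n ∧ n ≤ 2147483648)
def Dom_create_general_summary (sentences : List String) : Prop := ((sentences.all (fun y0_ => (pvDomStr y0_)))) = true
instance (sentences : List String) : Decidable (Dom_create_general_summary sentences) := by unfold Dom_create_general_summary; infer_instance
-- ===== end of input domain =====

-- B replaces A's score-list + stable descending sort + head with a table-driven score and a strict-first-max accumulator loop (simpler).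


-- ===== PORT A =====
def create_general_summary (sentences : List String) : String :=
  if sentences = [] then "No content available for summary."
  else
    -- for sentence in sentences[:5]: … informative_sentences.append((score, sentence))
    let informative_sentences : List (Int × String) :=
      (PySem.List.slice sentences none (some 5)).foldl
        (fun acc sentence =>
          let sentence_lower := PySem.Str.lower sentence
          let score : Int := ((PySem.Str.split₀ sentence).length : Int) * 2
          let score := if (["important", "key", "main", "primary", "critical", "essential"].any
              (fun word => PySem.Str.isIn word sentence_lower)) then score + 10 else score
          let score := if (["discussed", "mentioned", "talked", "said", "stated"].any
              (fun word => PySem.Str.isIn word sentence_lower)) then score + 5 else score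
          let score := if (["conclusion", "result", "outcome", "decision"].any
              (fun word => PySem.Str.isIn word sentence_lower)) then score + 8 else score
          let score := if (["number", "amount", "quantity", "statistics"].any
              (fun word => PySem.Str.isIn word sentence_lower)) then score + 3 else score
          acc ++ [(score, sentence)]) []
    -- informative_sentences.sort(key=lambda x: x[0], reverse=True)
    let sortedL := PySem.List.sorted informative_sentences (fun x => x.1) true
    match sortedL with
    | best :: _ => "• " ++ PySem.Str.slice best.2 none (some 200) ++ "..."
    | [] => "• " ++ PySem.Str.slice (PySem.List.pyGetD sentences 0 "") none (some 200) ++ "..."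

-- ===== PORT B =====
-- _BONUSES: the bonus table
def pvBonusTable : List (Int × List String) :=
  [(10, ["important", "key", "main", "primary", "critical", "essential"]),
   (5,  ["discussed", "mentioned", "talked", "said", "stated"]),
   (8,  ["conclusion", "result", "outcome", "decision"]),
   (3,  ["number", "amount", "quantity", "statistics"])]

-- _score: 2*word-count plus the sum of the table bonuses whose word list hits
def pvScore (sentence : String) : Int :=
  let low := PySem.Str.lower sentence
  2 * ((PySem.Str.split₀ sentence).length : Int) +
    pvBonusTable.foldl
      (fun acc p => if p.2.any (fun w => PySem.Str.isIn w low) then acc + p.1 else acc) 0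

-- the for-loop over tail: keep (best_score, best), replace only on a strictly larger score
def pvBestLoop (best_score : Int) (best : String) : List String → String
  | [] => best
  | sentence :: rest =>
      let sc := pvScore sentence
      if best_score < sc then pvBestLoop sc sentence rest
      else pvBestLoop best_score best rest

def create_general_summary_alt (sentences : List String) : String :=
  match sentences with
  | [] => "No content available for summary."
  | s :: rest =>
      -- head, *tail = sentences[:5]; the list is nonempty here so sentences[:5] = s :: rest.take 4 (exact)
      let best := pvBestLoop (pvScore s) s (rest.take 4)
      "• " ++ PySem.Str.slice best none (some 200) ++ "..."

-- ===== PRECONDITION & SPEC =====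
def Spec_create_general_summary (sentences : List String) (out : String) : Prop := out = create_general_summary_alt sentences
instance (sentences : List String) (out : String) : Decidable (Spec_create_general_summary sentences out) := by unfold Spec_create_general_summary; infer_instance

-- ===== CLAIM (what is proved, stated in full; the proofs are below) =====
def Claim_equal_create_general_summary : Prop := ∀ (sentences : List String), Dom_create_general_summary sentences → Spec_create_general_summary sentences (create_general_summary sentences)

-- ===== LEMMAS AND PROOFS =====

-- A's inline score, named for the proof only
def pvScoreA (sentence : String) : Int :=
  let sentence_lower := PySem.Str.lower sentence
  let score : Int := ((PySem.Str.split₀ sentence).length : Int) * 2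
  let score := if (["important", "key", "main", "primary", "critical", "essential"].any
      (fun word => PySem.Str.isIn word sentence_lower)) then score + 10 else score
  let score := if (["discussed", "mentioned", "talked", "said", "stated"].any
      (fun word => PySem.Str.isIn word sentence_lower)) then score + 5 else score
  let score := if (["conclusion", "result", "outcome", "decision"].any
      (fun word => PySem.Str.isIn word sentence_lower)) then score + 8 else score
  let score := if (["number", "amount", "quantity", "statistics"].any
      (fun word => PySem.Str.isIn word sentence_lower)) then score + 3 else score
  score

lemma pv_score_eq (s : String) : pvScoreA s = pvScore s := by
  unfold pvScoreA pvScore pvBonusTable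
  simp only [List.foldl_cons, List.foldl_nil]
  generalize (["important", "key", "main", "primary", "critical", "essential"].any
      (fun word => PySem.Str.isIn word (PySem.Str.lower s))) = b1
  generalize (["discussed", "mentioned", "talked", "said", "stated"].any
      (fun word => PySem.Str.isIn word (PySem.Str.lower s))) = b2
  generalize (["conclusion", "result", "outcome", "decision"].any
      (fun word => PySem.Str.isIn word (PySem.Str.lower s))) = b3
  generalize (["number", "amount", "quantity", "statistics"].any
      (fun word => PySem.Str.isIn word (PySem.Str.lower s))) = b4
  cases b1 <;> cases b2 <;> cases b3 <;> cases b4 <;> simp <;> ring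

-- head of insertBy with the reverse comparator: the new element takes the head iff its key is strictly larger
lemma pv_insertBy_rev_cons {α : Type} (key : α → Int) (x h : α) (t : List α) :
    PySem.List.insertBy (fun a b => decide (key b < key a)) x (h :: t) =
      if key h < key x then x :: h :: t
      else h :: PySem.List.insertBy (fun a b => decide (key b < key a)) x t := by
  simp [PySem.List.insertBy]

-- head of the insertion-sort foldl is the first strict maximum of the processed elements
lemma pv_foldl_insertBy_head {α : Type} (key : α → Int) :
    ∀ (ps : List α) (h : α) (t : List α), ∃ t',
      List.foldl (fun acc x => PySem.List.insertBy (fun a b => decide (key b < key a)) x acc) (h :: t) ps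
        = (List.foldl (fun m x => if key m < key x then x else m) h ps) :: t' := by
  intro ps
  induction ps with
  | nil => intro h t; exact ⟨t, rfl⟩
  | cons p ps ih =>
    intro h t
    rw [List.foldl_cons, List.foldl_cons, pv_insertBy_rev_cons]
    by_cases hc : key h < key p
    · simp only [hc, if_pos]
      exact ih p (h :: t)
    · simp only [hc, if_neg, not_false_iff]
      exact ih h _

-- the fold over (key x, x) pairs compared by fst is the fold over x compared by key, paired
lemma pv_foldl_pair {α : Type} (key : α → Int) :
    ∀ (l : List α) (s : α),
      List.foldl (fun (m x : Int × α) => if m.1 < x.1 then x else m) (key s, s) (l.map fun x => (key x, x))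
        = (key (List.foldl (fun m x => if key m < key x then x else m) s l),
           List.foldl (fun m x => if key m < key x then x else m) s l) := by
  intro l
  induction l with
  | nil => intro s; rfl
  | cons p l ih =>
    intro s
    rw [List.map_cons, List.foldl_cons, List.foldl_cons]
    by_cases hc : key s < key p <;> simp only [hc, if_pos, if_neg, not_false_iff] <;> exact ih _

-- B's loop, seeded with (pvScore b, b), is the same first-strict-max fold
lemma pv_bestLoop_eq_foldl :
    ∀ (l : List String) (b : String),
      pvBestLoop (pvScore b) b l = List.foldl (fun m x => if pvScore m < pvScore x then x else m) b l := by
  intro l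
  induction l with
  | nil => intro b; rfl
  | cons s l ih =>
    intro b
    rw [List.foldl_cons]
    by_cases hc : pvScore b < pvScore s <;>
      simp only [pvBestLoop, hc, if_pos, if_neg, not_false_iff] <;> exact ih _

-- ===== VERDICT (by name: the statement is the Claim_ definition above) =====
theorem create_general_summary_spec : Claim_equal_create_general_summary := by
  intro sentences _
  unfold Spec_create_general_summary create_general_summary create_general_summary_alt
  cases sentences with
  | nil => rfl
  | cons s rest =>
    simp only [reduceCtorEq]
    have hbody :
        (fun (acc : List (Int × String)) (sentence : String) =>
          let sentence_lower := PySem.Str.lower sentence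
          let score : Int := ((PySem.Str.split₀ sentence).length : Int) * 2
          let score := if (["important", "key", "main", "primary", "critical", "essential"].any
              (fun word => PySem.Str.isIn word sentence_lower)) then score + 10 else score
          let score := if (["discussed", "mentioned", "talked", "said", "stated"].any
              (fun word => PySem.Str.isIn word sentence_lower)) then score + 5 else score
          let score := if (["conclusion", "result", "outcome", "decision"].any
              (fun word => PySem.Str.isIn word sentence_lower)) then score + 8 else score
          let score := if (["number", "amount", "quantity", "statistics"].any
              (fun word => PySem.Str.isIn word sentence_lower)) then score + 3 else score
          acc ++ [(score, sentence)])
        = (fun acc sentence => acc ++ [(pvScoreA sentence, sentence)]) := rfl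
    have hAB : pvScoreA = pvScore := funext pv_score_eq
    rw [hbody, hAB, PySem.List.foldl_append_singleton_eq_map, List.nil_append]
    have hslice : PySem.List.slice (s :: rest) none (some 5) = s :: rest.take 4 := by
      rw [show (5 : Int) = ((5 : Nat) : Int) from rfl, PySem.List.slice_to_natCast]
      rfl
    rw [hslice, List.map_cons]
    rw [PySem.List.sorted_rev_eq_foldl_insertBy, List.foldl_cons]
    have h1 : PySem.List.insertBy
        (fun (a b : Int × String) => decide (b.1 < a.1)) (pvScore s, s) [] = [(pvScore s, s)] := by
      simp [PySem.List.insertBy]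
    rw [h1]
    obtain ⟨t', ht'⟩ := pv_foldl_insertBy_head (fun x : Int × String => x.1)
      ((rest.take 4).map fun x => (pvScore x, x)) (pvScore s, s) []
    rw [ht']
    rw [pv_foldl_pair pvScore (rest.take 4) s, pv_bestLoop_eq_foldl]
    rfl
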